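-- pv_equiv track=rewrite | github.com/adecourcy/SocialLearning | networkFunctions.py | binaryNetworkToList
-- ===== SOURCE A (Python) =====
-- def binaryNetworkToList(popSize, binaryNetwork):
--     networkConnections = []
--
--     for i in range(popSize):
--         networkConnections.append([])
--
--     bitPosition = 0
--
--     for i in range(popSize-1):
--         for k in range(i+1, popSize):
--             if (binaryNetwork & (1 << bitPosition)) != 0:
--                 networkConnections[i].append(str(k))
--                 networkConnections[k].append(str(i))
--             bitPosition += 1
--
--     return networkConnections
-- ===== SOURCE B (Python) =====
-- def binaryNetworkToList(popSize, binaryNetwork):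
--     result = []
--     for i in range(popSize):
--         row = []
--         for j in range(popSize):
--             if j == i:
--                 continue
--             a, b = (i, j) if i < j else (j, i)
--             bit = a * (popSize - 1) - a * (a - 1) // 2 + (b - a - 1)
--             if binaryNetwork & (1 << bit) != 0:
--                 row.append(str(j))
--         result.append(row)
--     return result
-- ===== Notes on version B (the rewrite author's own statement) =====
-- stated objective: alternative
-- what changed: A makes one triangular pass with a running bit counter, appending to both endpoints' lists as it goes; B instead builds each node's list independently by scanning all other nodes in increasing order and computing the pair's bit position with the closed-form triangular-index formula a*(popSize-1) - a*(a-1)//2 + (b-a-1).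
import Mathlib
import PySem

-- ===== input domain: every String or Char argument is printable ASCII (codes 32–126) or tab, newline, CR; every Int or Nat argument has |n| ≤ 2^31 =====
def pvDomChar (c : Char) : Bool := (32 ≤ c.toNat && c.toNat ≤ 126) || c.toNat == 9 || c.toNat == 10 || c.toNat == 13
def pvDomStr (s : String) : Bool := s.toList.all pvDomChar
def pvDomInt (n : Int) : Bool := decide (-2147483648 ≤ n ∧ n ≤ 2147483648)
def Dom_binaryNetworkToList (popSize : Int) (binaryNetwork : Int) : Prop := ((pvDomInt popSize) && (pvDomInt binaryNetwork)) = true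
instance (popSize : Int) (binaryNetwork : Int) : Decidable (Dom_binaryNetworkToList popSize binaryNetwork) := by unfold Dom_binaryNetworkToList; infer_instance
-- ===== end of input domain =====

-- B replaces A's single pass with a running bit counter by independent per-node scans
-- that compute each pair's bit index in closed form (objective: alternative decomposition).


-- ===== PORT A =====
-- networkConnections[i].append(v); every access is in range (0 ≤ i < len), where set/getD are exact
def pvAppendAt (nc : List (List String)) (i : Nat) (v : String) : List (List String) :=
  nc.set i (nc.getD i [] ++ [v])

-- body of A's inner loop; bitPosition is a Python int that never goes negative, carried as Nat
-- (so that `1 << bitPosition` is core Lean's `(1 : Int) <<< (bp : Nat)`, Python-exact)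
def pvStepA (binaryNetwork : Int) (i : Int) (st : List (List String) × Nat) (k : Int) :
    List (List String) × Nat :=
  if PySem.Int.band binaryNetwork ((1 : Int) <<< st.2) ≠ 0 then
    (pvAppendAt (pvAppendAt st.1 i.toNat (PySem.Int.toStr k)) k.toNat (PySem.Int.toStr i), st.2 + 1)
  else
    (st.1, st.2 + 1)

def binaryNetworkToList (popSize : Int) (binaryNetwork : Int) : List (List String) :=
  let networkConnections : List (List String) :=
    (PySem.List.pyRange 0 popSize 1).foldl (fun acc _ => acc ++ [[]]) []
  let final :=
    (PySem.List.pyRange 0 (popSize - 1) 1).foldl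
      (fun st i => (PySem.List.pyRange (i + 1) popSize 1).foldl (pvStepA binaryNetwork i) st)
      (networkConnections, 0)
  final.1

-- ===== PORT B =====
def pvBitIndex (popSize : Int) (a : Int) (b : Int) : Int :=
  a * (popSize - 1) - PySem.Int.floordiv (a * (a - 1)) 2 + (b - a - 1)

-- one row of B: scan all j, closed-form bit index for the unordered pair;
-- the bit index is ≥ 0 whenever the branch is reached, so `.toNat` matches Python's `1 << idx`
def pvRowB (popSize : Int) (binaryNetwork : Int) (i : Int) : List String :=
  (PySem.List.pyRange 0 popSize 1).foldl
    (fun row j =>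
      if j = i then row
      else
        let a := if i < j then i else j
        let b := if i < j then j else i
        if PySem.Int.band binaryNetwork ((1 : Int) <<< (pvBitIndex popSize a b).toNat) ≠ 0 then
          row ++ [PySem.Int.toStr j]
        else row)
    []

def binaryNetworkToList_alt (popSize : Int) (binaryNetwork : Int) : List (List String) :=
  (PySem.List.pyRange 0 popSize 1).foldl
    (fun result i => result ++ [pvRowB popSize binaryNetwork i]) []

-- ===== PRECONDITION & SPEC =====
def Spec_binaryNetworkToList (popSize : Int) (binaryNetwork : Int) (out : List (List String)) : Prop := out = binaryNetworkToList_alt popSize binaryNetwork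
instance (popSize : Int) (binaryNetwork : Int) (out : List (List String)) : Decidable (Spec_binaryNetworkToList popSize binaryNetwork out) := by unfold Spec_binaryNetworkToList; infer_instance

-- ===== CLAIM (what is proved, stated in full; the proofs are below) =====
def Claim_equal_binaryNetworkToList : Prop := ∀ (popSize : Int) (binaryNetwork : Int), Dom_binaryNetworkToList popSize binaryNetwork → Spec_binaryNetworkToList popSize binaryNetwork (binaryNetworkToList popSize binaryNetwork)

-- ===== LEMMAS AND PROOFS =====

-- the bit test, as a Bool
def pvBit (bn : Int) (p : Nat) : Bool := decide (PySem.Int.band bn ((1 : Int) <<< p) ≠ 0)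

-- start bit index of row a in an N-node network: sum_{r<a} (N-1-r)
def sidx (N : Nat) : Nat → Nat
  | 0 => 0
  | a + 1 => sidx N a + (N - 1 - a)

-- bit position of the pair (a, b), a < b, as A's running counter reaches it
def pvPos (n : Int) (a : Int) (b : Int) : Nat := sidx n.toNat a.toNat + (b - a - 1).toNat

-- neighbors of j below min m j (the lower part of row j after outer rows < m ran)
def pvRowLow (n bn m j : Int) : List String :=
  ((PySem.List.pyRange 0 (min m j) 1).filter (fun a => pvBit bn (pvPos n a j))).map PySem.Int.toStr

-- neighbors of j above j
def pvRowUp (n bn j : Int) : List String :=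
  ((PySem.List.pyRange (j + 1) n 1).filter (fun k => pvBit bn (pvPos n j k))).map PySem.Int.toStr

def pvRowFull (n bn j : Int) : List String := pvRowLow n bn j j ++ pvRowUp n bn j

-- A's networkConnections after the outer rows i < m have been fully processed
def pvStateA (n bn m : Int) : List (List String) :=
  (PySem.List.pyRange 0 n 1).map
    (fun j => if j < m then pvRowFull n bn j else pvRowLow n bn m j)

-- A's networkConnections mid-row i, with inner pairs (i, k') for k' < k processed
def pvMid (n bn i k : Int) : List (List String) :=
  (PySem.List.pyRange 0 n 1).map
    (fun j =>
      if j < i then pvRowFull n bn j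
      else if j = i then
        pvRowLow n bn i i ++
          ((PySem.List.pyRange (i + 1) k 1).filter (fun k' => pvBit bn (pvPos n i k'))).map PySem.Int.toStr
      else if j < k then pvRowLow n bn (i + 1) j
      else pvRowLow n bn i j)

lemma sidx_int (N : Nat) : ∀ a : Nat, a ≤ N → 2 * (sidx N a : Int) = 2 * a * (N - 1) - a * (a - 1) := by
  intro a
  induction a with
  | zero => intro _; simp [sidx]
  | succ a ih =>
    intro h
    have ih' := ih (by omega)
    have h1 : ((N - 1 - a : Nat) : Int) = (N : Int) - 1 - (a : Int) := by omega
    simp only [sidx, Nat.cast_add, h1]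
    push_cast
    ring_nf
    ring_nf at ih'
    linarith

lemma pvBitIndex_eq (n a b : Int) (h0 : 0 ≤ a) (hab : a < b) (hbn : b < n) :
    pvBitIndex n a b = (pvPos n a b : Int) := by
  obtain ⟨k, hk⟩ := Int.even_mul_succ_self (a - 1)
  have hk2 : a * (a - 1) = 2 * k := by ring_nf at hk ⊢; linarith
  have hfd : PySem.Int.floordiv (a * (a - 1)) 2 = k := by
    rw [PySem.Int.floordiv_eq_ediv_of_pos (by norm_num), hk2,
      Int.mul_ediv_cancel_left _ (by norm_num)]
  have hs := sidx_int n.toNat a.toNat (by omega)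
  have hca : ((a.toNat : Nat) : Int) = a := Int.toNat_of_nonneg h0
  have hcn : ((n.toNat : Nat) : Int) = n := Int.toNat_of_nonneg (by omega)
  have hcast : ((pvPos n a b : Nat) : Int) = (sidx n.toNat a.toNat : Int) + (b - a - 1) := by
    unfold pvPos; omega
  rw [hca, hcn] at hs
  unfold pvBitIndex
  rw [hfd, hcast]
  linarith

lemma appendAt_map_range (f : Int → List String) (n j : Int) (h0 : 0 ≤ j) (hj : j < n) (v : String) :
    pvAppendAt ((PySem.List.pyRange 0 n 1).map f) j.toNat v
      = (PySem.List.pyRange 0 n 1).map (fun x => if x = j then f x ++ [v] else f x) := by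
  unfold pvAppendAt
  have hjl : j.toNat < ((PySem.List.pyRange 0 n 1).map f).length := by
    rw [List.length_map, PySem.List.length_pyRange_one]; omega
  have hjr : j.toNat < (PySem.List.pyRange 0 n 1).length := by
    rw [PySem.List.length_pyRange_one]; omega
  have hget : ((PySem.List.pyRange 0 n 1).map f).getD j.toNat [] = f j := by
    rw [List.getD_eq_getElem _ _ hjl, List.getElem_map]
    congr 1
    rw [PySem.List.getElem_pyRange_one]
    omega
  rw [hget]
  apply List.ext_getElem
  · simp
  · intro idx h1 h2
    have hlen2 : idx < (PySem.List.pyRange 0 n 1).length := by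
      rw [List.length_set, List.length_map] at h1; exact h1
    rw [List.getElem_set, List.getElem_map, List.getElem_map]
    have hval : (PySem.List.pyRange 0 n 1)[idx]'hlen2 = (idx : Int) := by
      rw [PySem.List.getElem_pyRange_one]; omega
    rw [hval]
    by_cases hcase : j.toNat = idx
    · rw [if_pos hcase, if_pos (by omega)]
      have hji : (idx : Int) = j := by omega
      rw [hji]
    · rw [if_neg hcase, if_neg (by omega)]


lemma pos_succ (n i k : Int) (hik : i < k) : pvPos n i (k + 1) = pvPos n i k + 1 := by
  unfold pvPos; omega

lemma rowLow_snoc (n bn i j : Int) (h0 : 0 ≤ i) (hij : i < j) :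
    pvRowLow n bn (i + 1) j
      = pvRowLow n bn i j ++ (if pvBit bn (pvPos n i j) then [PySem.Int.toStr i] else []) := by
  unfold pvRowLow
  rw [min_eq_left (by omega : i + 1 ≤ j), min_eq_left (by omega : i ≤ j),
    PySem.List.pyRange_one_succ_right h0, List.filter_append, List.map_append]
  congr 1
  by_cases hb : pvBit bn (pvPos n i j) <;> simp [hb]

lemma stepA_mid (n bn i k : Int) (h0 : 0 ≤ i) (hik : i < k) (hkn : k < n) :
    pvStepA bn i (pvMid n bn i k, pvPos n i k) k = (pvMid n bn i (k + 1), pvPos n i (k + 1)) := by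
  have hpartial : (PySem.List.pyRange (i + 1) (k + 1) 1).filter (fun k' => pvBit bn (pvPos n i k'))
      = (PySem.List.pyRange (i + 1) k 1).filter (fun k' => pvBit bn (pvPos n i k'))
        ++ (if pvBit bn (pvPos n i k) then [k] else []) := by
    rw [PySem.List.pyRange_one_succ_right (by omega : i + 1 ≤ k), List.filter_append]
    congr 1
    by_cases hb : pvBit bn (pvPos n i k) <;> simp [hb]
  rw [pos_succ n i k hik]
  unfold pvStepA
  by_cases hb : PySem.Int.band bn ((1 : Int) <<< pvPos n i k) ≠ 0
  · rw [if_pos hb]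
    have hbit : pvBit bn (pvPos n i k) = true := by simp [pvBit, hb]
    refine Prod.ext ?_ rfl
    show pvAppendAt (pvAppendAt (pvMid n bn i k) i.toNat (PySem.Int.toStr k)) k.toNat
        (PySem.Int.toStr i) = pvMid n bn i (k + 1)
    unfold pvMid
    rw [appendAt_map_range _ n i h0 (by omega), appendAt_map_range _ n k (by omega) hkn]
    apply List.map_congr_left
    intro x hx
    rw [PySem.List.mem_pyRange_one] at hx
    by_cases hxi : x < i
    · rw [if_neg (by omega), if_neg (by omega), if_pos hxi, if_pos hxi]
    · by_cases hxe : x = i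
      · subst hxe
        rw [if_pos rfl, if_neg (by omega), if_neg (by omega), if_pos rfl, if_pos rfl,
          if_neg (by omega), hpartial, hbit]
        simp
      · by_cases hxk : x < k
        · rw [if_neg (by omega), if_neg hxe, if_neg hxi, if_neg hxe, if_pos hxk,
            if_neg hxi, if_neg hxe, if_pos (by omega)]
        · by_cases hxke : x = k
          · subst hxke
            rw [if_pos rfl, if_neg hxe, if_neg hxi, if_neg hxe, if_neg hxk,
              if_neg hxi, if_neg hxe, if_pos (by omega)]
            rw [rowLow_snoc n bn i x h0 hik, hbit]
            simp
          · rw [if_neg hxke, if_neg hxe, if_neg hxi, if_neg hxe, if_neg hxk,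
              if_neg hxi, if_neg hxe, if_neg (by omega : ¬ x < k + 1)]
  · rw [if_neg hb]
    have hbit : pvBit bn (pvPos n i k) = false := by simp [pvBit] at hb ⊢; omega
    refine Prod.ext ?_ rfl
    show pvMid n bn i k = pvMid n bn i (k + 1)
    unfold pvMid
    apply List.map_congr_left
    intro x hx
    rw [PySem.List.mem_pyRange_one] at hx
    by_cases hxi : x < i
    · rw [if_pos hxi, if_pos hxi]
    · by_cases hxe : x = i
      · subst hxe
        rw [if_neg hxi, if_pos rfl, if_neg hxi, if_pos rfl, hpartial, hbit]
        simp
      · by_cases hxk : x < k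
        · rw [if_neg hxi, if_neg hxe, if_pos hxk, if_neg hxi, if_neg hxe, if_pos (by omega)]
        · by_cases hxke : x = k
          · subst hxke
            rw [if_neg hxi, if_neg hxe, if_neg hxk, if_neg hxi, if_neg hxe, if_pos (by omega),
              rowLow_snoc n bn i x h0 hik, hbit]
            simp
          · rw [if_neg hxi, if_neg hxe, if_neg hxk, if_neg hxi, if_neg hxe, if_neg (by omega)]

lemma innerA (n bn i : Int) (h0 : 0 ≤ i) (hin : i < n) :
    ∀ c : Nat, ∀ k, (n - k).toNat = c → i < k → k ≤ n →
      (PySem.List.pyRange k n 1).foldl (pvStepA bn i) (pvMid n bn i k, pvPos n i k)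
        = (pvMid n bn i n, pvPos n i n) := by
  intro c
  induction c with
  | zero =>
    intro k hc hik hkn
    have : k = n := by omega
    subst this
    rw [PySem.List.pyRange_one_eq_nil le_rfl]
    rfl
  | succ c ih =>
    intro k hc hik hkn
    have hklt : k < n := by omega
    rw [PySem.List.pyRange_one_cons hklt, List.foldl_cons, stepA_mid n bn i k h0 hik hklt]
    exact ih (k + 1) (by omega) (by omega) (by omega)

lemma mid_start (n bn i : Int) (h0 : 0 ≤ i) :
    pvMid n bn i (i + 1) = pvStateA n bn i := by
  unfold pvMid pvStateA
  apply List.map_congr_left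
  intro x hx
  rw [PySem.List.mem_pyRange_one] at hx
  by_cases hxi : x < i
  · rw [if_pos hxi, if_pos hxi]
  · by_cases hxe : x = i
    · subst hxe
      rw [if_neg hxi, if_pos rfl, if_neg hxi, PySem.List.pyRange_one_eq_nil le_rfl]
      simp
    · rw [if_neg hxi, if_neg hxe, if_neg (by omega), if_neg hxi]

lemma mid_end (n bn i : Int) (h0 : 0 ≤ i) (hin : i < n) :
    pvMid n bn i n = pvStateA n bn (i + 1) := by
  unfold pvMid pvStateA
  apply List.map_congr_left
  intro x hx
  rw [PySem.List.mem_pyRange_one] at hx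
  by_cases hxi : x < i
  · rw [if_pos hxi, if_pos (by omega)]
  · by_cases hxe : x = i
    · subst hxe
      rw [if_neg hxi, if_pos rfl, if_pos (by omega)]
      rfl
    · rw [if_neg hxi, if_neg hxe, if_pos (by omega), if_neg (by omega)]

lemma pos_row_start (n i : Int) (h0 : 0 ≤ i) : pvPos n i (i + 1) = sidx n.toNat i.toNat := by
  unfold pvPos; omega

lemma pos_row_end (n i : Int) (h0 : 0 ≤ i) (hin : i < n) :
    pvPos n i n = sidx n.toNat (i + 1).toNat := by
  have h1 : (i + 1).toNat = i.toNat + 1 := by omega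
  rw [h1]
  show pvPos n i n = sidx n.toNat i.toNat + (n.toNat - 1 - i.toNat)
  unfold pvPos
  omega

lemma outerA (n bn : Int) :
    ∀ c : Nat, ∀ m : Int, (n - 1 - m).toNat = c → 0 ≤ m → m ≤ n - 1 →
      (PySem.List.pyRange m (n - 1) 1).foldl
          (fun st i => (PySem.List.pyRange (i + 1) n 1).foldl (pvStepA bn i) st)
          (pvStateA n bn m, sidx n.toNat m.toNat)
        = (pvStateA n bn (n - 1), sidx n.toNat (n - 1).toNat) := by
  intro c
  induction c with
  | zero =>
    intro m hc hm0 hm1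
    have : m = n - 1 := by omega
    subst this
    rw [PySem.List.pyRange_one_eq_nil le_rfl]
    rfl
  | succ c ih =>
    intro m hc hm0 hm1
    have hmlt : m < n - 1 := by omega
    rw [PySem.List.pyRange_one_cons hmlt, List.foldl_cons]
    have hstart : (pvStateA n bn m, sidx n.toNat m.toNat) = (pvMid n bn m (m + 1), pvPos n m (m + 1)) := by
      rw [mid_start n bn m hm0, pos_row_start n m hm0]
    rw [hstart,
      innerA n bn m hm0 (by omega) (n - (m + 1)).toNat (m + 1) rfl (by omega) (by omega),
      mid_end n bn m hm0 (by omega), pos_row_end n m hm0 (by omega)]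
    exact ih (m + 1) (by omega) (by omega) (by omega)

lemma foldB_low (n bn i : Int) (hin : i < n) :
    ∀ l : List Int, (∀ x ∈ l, 0 ≤ x ∧ x < i) → ∀ acc : List String,
      l.foldl
        (fun row j =>
          if j = i then row
          else
            let a := if i < j then i else j
            let b := if i < j then j else i
            if PySem.Int.band bn ((1 : Int) <<< (pvBitIndex n a b).toNat) ≠ 0 then
              row ++ [PySem.Int.toStr j]
            else row) acc
      = acc ++ (l.filter (fun x => pvBit bn (pvPos n x i))).map PySem.Int.toStr := by
  intro l
  induction l with
  | nil => intro _ acc; simp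
  | cons x l ih =>
    intro hmem acc
    obtain ⟨hx0, hxi⟩ := hmem x (List.mem_cons_self)
    have hidx : (pvBitIndex n x i).toNat = pvPos n x i := by
      rw [pvBitIndex_eq n x i hx0 hxi hin]; omega
    rw [List.foldl_cons, List.filter_cons]
    have hrest := fun y hy => hmem y (List.mem_cons_of_mem x hy)
    rw [if_neg (by omega : ¬ x = i), if_neg (by omega : ¬ i < x), if_neg (by omega : ¬ i < x)]
    simp only [hidx]
    by_cases hb : PySem.Int.band bn ((1 : Int) <<< pvPos n x i) ≠ 0
    · rw [if_pos hb, ih hrest, if_pos (by simp [pvBit, hb])]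
      simp
    · rw [if_neg hb, ih hrest, if_neg (by simp [pvBit]; simp [pvBit] at hb; omega)]

lemma foldB_up (n bn i : Int) (h0 : 0 ≤ i) :
    ∀ l : List Int, (∀ x ∈ l, i < x ∧ x < n) → ∀ acc : List String,
      l.foldl
        (fun row j =>
          if j = i then row
          else
            let a := if i < j then i else j
            let b := if i < j then j else i
            if PySem.Int.band bn ((1 : Int) <<< (pvBitIndex n a b).toNat) ≠ 0 then
              row ++ [PySem.Int.toStr j]
            else row) acc
      = acc ++ (l.filter (fun x => pvBit bn (pvPos n i x))).map PySem.Int.toStr := by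
  intro l
  induction l with
  | nil => intro _ acc; simp
  | cons x l ih =>
    intro hmem acc
    obtain ⟨hix, hxn⟩ := hmem x (List.mem_cons_self)
    have hidx : (pvBitIndex n i x).toNat = pvPos n i x := by
      rw [pvBitIndex_eq n i x h0 hix hxn]; omega
    rw [List.foldl_cons, List.filter_cons]
    have hrest := fun y hy => hmem y (List.mem_cons_of_mem x hy)
    rw [if_neg (by omega : ¬ x = i), if_pos hix, if_pos hix]
    simp only [hidx]
    by_cases hb : PySem.Int.band bn ((1 : Int) <<< pvPos n i x) ≠ 0
    · rw [if_pos hb, ih hrest, if_pos (by simp [pvBit, hb])]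
      simp
    · rw [if_neg hb, ih hrest, if_neg (by simp [pvBit]; simp [pvBit] at hb; omega)]

lemma rowB_eq_rowFull (n bn i : Int) (h0 : 0 ≤ i) (hin : i < n) :
    pvRowB n bn i = pvRowFull n bn i := by
  unfold pvRowB
  rw [PySem.List.pyRange_one_append 0 i n h0 (by omega), PySem.List.pyRange_one_cons hin,
    List.foldl_append, List.foldl_cons]
  rw [foldB_low n bn i hin _ (fun x hx => by rw [PySem.List.mem_pyRange_one] at hx; omega) []]
  rw [if_pos rfl]
  rw [foldB_up n bn i h0 _ (fun x hx => by rw [PySem.List.mem_pyRange_one] at hx; omega) _]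
  unfold pvRowFull pvRowLow pvRowUp
  rw [min_self]
  simp


-- ===== VERDICT (by name: the statement is the Claim_ definition above) =====
theorem binaryNetworkToList_spec : Claim_equal_binaryNetworkToList := by
  intro popSize binaryNetwork _
  unfold Spec_binaryNetworkToList binaryNetworkToList binaryNetworkToList_alt
  rw [PySem.List.foldl_append_singleton_eq_map (fun _ : Int => ([] : List String)),
    PySem.List.foldl_append_singleton_eq_map (pvRowB popSize binaryNetwork)]
  simp only [List.nil_append]
  by_cases hn : popSize ≤ 0
  · rw [PySem.List.pyRange_one_eq_nil hn, PySem.List.pyRange_one_eq_nil (by omega : popSize - 1 ≤ 0)]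
    rfl
  · have hinit : (PySem.List.pyRange 0 popSize 1).map (fun _ => ([] : List String))
        = pvStateA popSize binaryNetwork 0 := by
      unfold pvStateA
      apply List.map_congr_left
      intro x hx
      rw [PySem.List.mem_pyRange_one] at hx
      rw [if_neg (by omega)]
      unfold pvRowLow
      rw [min_eq_left (by omega : (0:Int) ≤ x), PySem.List.pyRange_one_eq_nil le_rfl]
      rfl
    rw [hinit]
    show (List.foldl
        (fun st i => List.foldl (pvStepA binaryNetwork i) st (PySem.List.pyRange (i + 1) popSize 1))
        (pvStateA popSize binaryNetwork 0, sidx popSize.toNat (Int.toNat 0))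
        (PySem.List.pyRange 0 (popSize - 1) 1)).1
      = List.map (pvRowB popSize binaryNetwork) (PySem.List.pyRange 0 popSize 1)
    rw [outerA popSize binaryNetwork (popSize - 1 - 0).toNat 0 rfl le_rfl (by omega)]
    show pvStateA popSize binaryNetwork (popSize - 1)
        = (PySem.List.pyRange 0 popSize 1).map (pvRowB popSize binaryNetwork)
    unfold pvStateA
    apply List.map_congr_left
    intro x hx
    rw [PySem.List.mem_pyRange_one] at hx
    rw [rowB_eq_rowFull popSize binaryNetwork x (by omega) (by omega)]
    by_cases hxm : x < popSize - 1
    · rw [if_pos hxm]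
    · rw [if_neg hxm]
      have hx1 : x = popSize - 1 := by omega
      subst hx1
      unfold pvRowFull pvRowUp
      rw [PySem.List.pyRange_one_eq_nil (by omega : popSize ≤ popSize - 1 + 1)]
      simp
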